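-- pv_equiv track=rewrite | github.com/Paskushka/253503_Detkovsky_9 | IGI/LR3/Lab3IGI/Task4.py | sort_words_after_comma
-- ===== SOURCE A (Python) =====
-- def sort_words_after_comma(string):
--     """Function for sort words in string"""
--     words = string.split(",")
--     result = []
--     for i in range(1, len(words)):
--         words_after_comma = words[i].split()
--         if len(words_after_comma) > 0:
--             first_word = words_after_comma[0].strip()
--             result.append(first_word)
--
--     return sorted(result)
-- ===== SOURCE B (Python) =====
-- def sort_words_after_comma(string):
--     """Single left-to-right scan: after each comma, skip whitespace and
--     collect the following run of non-space, non-comma characters."""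
--     words = []
--     n = len(string)
--     i = 0
--     while i < n:
--         if string[i] == ',':
--             i += 1
--             while i < n and string[i].isspace():
--                 i += 1
--             j = i
--             while j < n and not string[j].isspace() and string[j] != ',':
--                 j += 1
--             if j > i:
--                 words.append(string[i:j])
--                 i = j
--         else:
--             i += 1
--     return sorted(words)
-- ===== Notes on version B (the rewrite author's own statement) =====
-- stated objective: alternative
-- what changed: Replaces A's two splitting passes (split the string on ',' into a list of segments, then whitespace-split each segment to take its first token) by a single left-to-right index scan that, after each comma, skips whitespace and collects the following run of non-space non-comma characters, never materialising the segment lists.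
import Mathlib
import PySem

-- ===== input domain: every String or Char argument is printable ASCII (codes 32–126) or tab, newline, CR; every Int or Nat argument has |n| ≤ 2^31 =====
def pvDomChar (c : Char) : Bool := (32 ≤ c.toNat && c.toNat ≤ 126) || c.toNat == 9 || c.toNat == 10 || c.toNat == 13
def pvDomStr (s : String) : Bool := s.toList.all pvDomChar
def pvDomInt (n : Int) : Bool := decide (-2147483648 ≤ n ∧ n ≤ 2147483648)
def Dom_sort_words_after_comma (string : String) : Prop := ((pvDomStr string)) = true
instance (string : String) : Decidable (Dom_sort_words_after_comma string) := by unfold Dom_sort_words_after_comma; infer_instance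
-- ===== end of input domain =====

-- B replaces A's two split passes (split on "," then per-segment whitespace split) by a single
-- left-to-right scan collecting, after each comma, the first run of non-space non-comma characters
-- (objective: alternative).

-- ===== PORT A =====
def sort_words_after_comma (string : String) : List String :=
  let words : List String := (PySem.Chars.splitOn string.toList ",".toList).map String.ofList
  let result : List String :=
    (PySem.List.pyRange 1 (words.length : Int) 1).foldl
      (fun acc i =>
        let words_after_comma := PySem.Str.split₀ (PySem.List.pyGetD words i "")
        if words_after_comma.length > 0 then
          acc ++ [PySem.Str.strip (PySem.List.pyGetD words_after_comma 0 "")]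
        else acc) []
  PySem.List.sorted result (fun x => x) false

-- ===== PORT B =====
-- Source B's scanner: at a ',', the first inner while loop (skip whitespace) is lstrip, the second
-- (advance j over non-space non-comma chars) is takeWhile; keep the run if nonempty.
def pvScan : List Char → List (List Char)
  | [] => []
  | c :: rest =>
    if c = ',' then
      let rest' := PySem.Chars.lstrip rest
      let w := rest'.takeWhile (fun d => !PySem.Chars.isspace d && !(d == ','))
      if w = [] then pvScan rest'
      else w :: pvScan (rest'.drop w.length)
    else pvScan rest
termination_by l => l.length
decreasing_by
  · simp only [PySem.Chars.lstrip, List.length_cons]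
    exact Nat.lt_succ_of_le (List.length_dropWhile_le _ _)
  · simp only [PySem.Chars.lstrip, List.length_cons]
    have h := List.length_dropWhile_le PySem.Chars.isspace rest
    simp only [List.length_drop]
    omega
  · simp only [List.length_cons]; exact Nat.lt_succ_self _

def sort_words_after_comma_alt (string : String) : List String :=
  PySem.List.sorted ((pvScan string.toList).map String.ofList) (fun x => x) false

-- ===== PRECONDITION & SPEC =====
def Spec_sort_words_after_comma (string : String) (out : List String) : Prop := out = sort_words_after_comma_alt string
instance (string : String) (out : List String) : Decidable (Spec_sort_words_after_comma string out) := by unfold Spec_sort_words_after_comma; infer_instance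

-- ===== CLAIM (what is proved, stated in full; the proofs are below) =====
def Claim_equal_sort_words_after_comma : Prop := ∀ (string : String), Dom_sort_words_after_comma string → Spec_sort_words_after_comma string (sort_words_after_comma string)

-- ===== LEMMAS AND PROOFS =====
def pvSegs : List Char → List (List Char)
  | [] => [[]]
  | c :: rest =>
    match pvSegs rest with
    | [] => [[]]
    | t :: ts => if c = ',' then [] :: t :: ts else (c :: t) :: ts
def pvConsHead (p : List Char) : List (List Char) → List (List Char)
  | [] => [p]
  | t :: ts => (p ++ t) :: ts
def pvTok? (seg : List Char) : Option (List Char) :=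
  let w := (PySem.Chars.lstrip seg).takeWhile (fun d => !PySem.Chars.isspace d)
  if w = [] then none else some w
theorem pvSegs_ne_nil (l : List Char) : pvSegs l ≠ [] := by
  cases l with
  | nil => simp [pvSegs]
  | cons c rest =>
    simp only [pvSegs]
    rcases h : pvSegs rest with _ | ⟨t, ts⟩
    · simp
    · simp only; split <;> simp
theorem dropWhile_eq_self_of_false {p : Char → Bool} {l : List Char} (h : ∀ c ∈ l, p c = false) :
    l.dropWhile p = l := by
  cases l with
  | nil => rfl
  | cons a t => rw [List.dropWhile_cons_of_neg]; simp [h a (by simp)]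
theorem pvSegs_append_no_comma (a b : List Char) (h : ',' ∉ a) :
    pvSegs (a ++ b) = pvConsHead a (pvSegs b) := by
  induction a with
  | nil =>
    rcases hs : pvSegs b with _ | ⟨t, ts⟩
    · exact absurd hs (pvSegs_ne_nil b)
    · simp [hs, pvConsHead]
  | cons c a' ih =>
    have hc : c ≠ ',' := fun hc => h (by simp [hc])
    simp only [List.cons_append, pvSegs, ih (fun hm => h (by simp [hm]))]
    rcases hs : pvSegs b with _ | ⟨t, ts⟩
    · exact absurd hs (pvSegs_ne_nil b)
    · simp [pvConsHead, hc]

-- ws := takeWhile isspace rest facts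
theorem pvTok?_spaces (l : List Char) (h : ∀ c ∈ l, PySem.Chars.isspace c = true) :
    pvTok? l = none := by
  unfold pvTok? PySem.Chars.lstrip
  simp [List.dropWhile_eq_nil_iff.mpr h]

theorem takeWhile_nonspace_append (w t : List Char)
    (hw : ∀ c ∈ w, PySem.Chars.isspace c = false)
    (ht : t = [] ∨ ∃ d t', t = d :: t' ∧ PySem.Chars.isspace d = true) :
    (w ++ t).takeWhile (fun d => !PySem.Chars.isspace d) = w := by
  induction w with
  | nil =>
    rcases ht with rfl | ⟨d, t', rfl, hd⟩
    · rfl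
    · simp [hd]
  | cons c w' ih =>
    simp only [List.cons_append, List.takeWhile_cons, hw c (by simp)]
    simp [ih (fun c hc => hw c (by simp [hc]))]

theorem pvScan_eq (s : List Char) :
    pvScan s = (pvSegs s).tail.filterMap pvTok? := by
  induction s using pvScan.induct with
  | case1 => rw [pvScan]; simp [pvSegs]
  | case2 rest rest' w hw ih =>
    have hscan : pvScan (',' :: rest) = pvScan rest' := by
      rw [pvScan]; rw [if_pos hw, if_pos rfl]
    rw [hscan, ih]
    have hws_sp : ∀ c ∈ rest.takeWhile PySem.Chars.isspace, PySem.Chars.isspace c = true :=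
      fun c hc => List.mem_takeWhile_imp hc
    have hws_nc : ',' ∉ rest.takeWhile PySem.Chars.isspace := by
      intro hm; have := hws_sp ',' hm; simp [PySem.Chars.isspace] at this
    have hsegs : pvSegs (',' :: rest) = [] :: pvSegs rest := by
      obtain ⟨t', ts', hts'⟩ : ∃ t' ts', pvSegs rest = t' :: ts' := by
        rcases hs : pvSegs rest with _ | ⟨t', ts'⟩
        · exact absurd hs (pvSegs_ne_nil _)
        · exact ⟨t', ts', rfl⟩
      simp [pvSegs, hts']
    rw [hsegs]
    simp only [List.tail_cons]
    conv_rhs => rw [← List.takeWhile_append_dropWhile (p := PySem.Chars.isspace) (l := rest)]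
    rw [pvSegs_append_no_comma _ _ hws_nc]
    have hrd : rest.dropWhile PySem.Chars.isspace = rest' := rfl
    rw [hrd]
    rcases hr : rest' with _ | ⟨d, r⟩
    · simp [pvSegs, pvConsHead, pvTok?_spaces _ hws_sp]
    · have hd_sp : PySem.Chars.isspace d = false := by
        have hdw : rest.dropWhile PySem.Chars.isspace = d :: r := by rw [hrd, hr]
        have h2 := List.head_dropWhile_not PySem.Chars.isspace (l := rest) (by simp [hdw])
        simpa [hdw] using h2
      have hd : d = ',' := by
        have hw' : (d :: r).takeWhile (fun d => !PySem.Chars.isspace d && !(d == ',')) = [] := by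
          rw [← hr]; exact hw
        simp [hd_sp] at hw'
        exact hw'
      subst hd
      have hsegs2 : pvSegs (',' :: r) = [] :: pvSegs r := by
        obtain ⟨t', ts', hts'⟩ : ∃ t' ts', pvSegs r = t' :: ts' := by
          rcases hs : pvSegs r with _ | ⟨t', ts'⟩
          · exact absurd hs (pvSegs_ne_nil _)
          · exact ⟨t', ts', rfl⟩
        simp [pvSegs, hts']
      rw [hsegs2]
      simp [pvConsHead, pvTok?_spaces _ hws_sp]
  | case3 rest rest' w hw ih =>
    have hws_sp : ∀ c ∈ rest.takeWhile PySem.Chars.isspace, PySem.Chars.isspace c = true :=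
      fun c hc => List.mem_takeWhile_imp hc
    have hws_nc : ',' ∉ rest.takeWhile PySem.Chars.isspace := by
      intro hm; have := hws_sp ',' hm; simp [PySem.Chars.isspace] at this
    have hw_sp : ∀ c ∈ w, PySem.Chars.isspace c = false := by
      intro c hc
      have := List.mem_takeWhile_imp hc
      simp at this
      exact this.1
    have hw_nc : ',' ∉ w := by
      intro hm
      have := List.mem_takeWhile_imp hm
      simp at this
    have hwsplit : w ++ rest'.dropWhile (fun d => !PySem.Chars.isspace d && !(d == ',')) = rest' :=
      List.takeWhile_append_dropWhile
    have hdrop_eq : rest'.drop w.length =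
        rest'.dropWhile (fun d => !PySem.Chars.isspace d && !(d == ',')) := by
      conv_lhs => rw [← hwsplit]
      exact List.drop_left' rfl
    have hscan : pvScan (',' :: rest) = w :: pvScan (rest'.drop w.length) := by
      rw [pvScan]; rw [if_neg hw, if_pos rfl]
    rw [hscan, ih, hdrop_eq]
    have hsegs : pvSegs (',' :: rest) = [] :: pvSegs rest := by
      obtain ⟨t', ts', hts'⟩ : ∃ t' ts', pvSegs rest = t' :: ts' := by
        rcases hs : pvSegs rest with _ | ⟨t', ts'⟩
        · exact absurd hs (pvSegs_ne_nil _)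
        · exact ⟨t', ts', rfl⟩
      simp [pvSegs, hts']
    rw [hsegs]
    simp only [List.tail_cons]
    conv_rhs => rw [← List.takeWhile_append_dropWhile (p := PySem.Chars.isspace) (l := rest)]
    rw [pvSegs_append_no_comma _ _ hws_nc]
    have hrd : rest.dropWhile PySem.Chars.isspace = rest' := rfl
    rw [hrd]
    conv_rhs => rw [← hwsplit]
    rw [pvSegs_append_no_comma _ _ hw_nc]
    set rem := rest'.dropWhile (fun d => !PySem.Chars.isspace d && !(d == ',')) with hrem
    obtain ⟨t, ts, hts⟩ : ∃ t ts, pvSegs rem = t :: ts := by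
      rcases hs : pvSegs rem with _ | ⟨t, ts⟩
      · exact absurd hs (pvSegs_ne_nil _)
      · exact ⟨t, ts, rfl⟩
    have ht_struct : t = [] ∨ ∃ d t', t = d :: t' ∧ PySem.Chars.isspace d = true := by
      rcases hrm : rem with _ | ⟨r0, rem2⟩
      · rw [hrm] at hts; simp [pvSegs] at hts; left; exact hts.1
      · have hr0 : (!PySem.Chars.isspace r0 && !(r0 == ',')) = false := by
          have hdw : rest'.dropWhile (fun d => !PySem.Chars.isspace d && !(d == ',')) = r0 :: rem2 := by
            rw [← hrem]; exact hrm
          have h2 := List.head_dropWhile_not (fun d => !PySem.Chars.isspace d && !(d == ','))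
            (l := rest') (by simp [hdw])
          simpa [hdw] using h2
        by_cases hr0c : r0 = ','
        · subst hr0c
          rw [hrm] at hts
          obtain ⟨t2, ts2, hts2⟩ : ∃ t2 ts2, pvSegs rem2 = t2 :: ts2 := by
            rcases hs : pvSegs rem2 with _ | ⟨t2, ts2⟩
            · exact absurd hs (pvSegs_ne_nil _)
            · exact ⟨t2, ts2, rfl⟩
          simp [pvSegs, hts2] at hts
          left; exact hts.1
        · have hr0_sp : PySem.Chars.isspace r0 = true := by
            simp [hr0c] at hr0
            exact hr0
          rw [hrm] at hts
          obtain ⟨t2, ts2, hts2⟩ : ∃ t2 ts2, pvSegs rem2 = t2 :: ts2 := by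
            rcases hs : pvSegs rem2 with _ | ⟨t2, ts2⟩
            · exact absurd hs (pvSegs_ne_nil _)
            · exact ⟨t2, ts2, rfl⟩
          simp [pvSegs, hts2, hr0c] at hts
          right; exact ⟨r0, t2, hts.1.symm, hr0_sp⟩
    rw [hts]
    simp only [pvConsHead, List.filterMap_cons]
    have htok : pvTok? (rest.takeWhile PySem.Chars.isspace ++ (w ++ t)) = some w := by
      unfold pvTok? PySem.Chars.lstrip
      rw [List.dropWhile_append]
      rw [List.dropWhile_eq_nil_iff.mpr hws_sp]
      simp only [List.isEmpty_nil, if_true]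
      have hwt : (w ++ t).dropWhile PySem.Chars.isspace = w ++ t := by
        rcases hwc : w with _ | ⟨w0, w'⟩
        · exact absurd hwc hw
        · rw [List.cons_append, List.dropWhile_cons_of_neg]
          simp [hw_sp w0 (by rw [hwc]; simp)]
      rw [hwt, takeWhile_nonspace_append w t hw_sp ht_struct]
      simp [hw]
    rw [htok]
    simp
  | case4 c rest hc ih =>
    rw [pvScan]
    simp only [hc, if_false]
    rw [ih]
    obtain ⟨t, ts, hts⟩ : ∃ t ts, pvSegs rest = t :: ts := by
      rcases hs : pvSegs rest with _ | ⟨t, ts⟩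
      · exact absurd hs (pvSegs_ne_nil rest)
      · exact ⟨t, ts, rfl⟩
    simp [pvSegs, hts, hc]


theorem splitOn_go_eq (fuel : Nat) (l cur : List Char) (acc : List (List Char))
    (h : l.length < fuel) :
    PySem.Chars.splitOn.go [','] fuel l cur acc = acc.reverse ++ pvConsHead cur.reverse (pvSegs l) := by
  induction fuel generalizing l cur acc with
  | zero => omega
  | succ f ih =>
    cases l with
    | nil =>
      rw [PySem.Chars.splitOn.go]
      simp [pvSegs, pvConsHead]
      omega
    | cons c rest =>
      rw [PySem.Chars.splitOn.go]
      by_cases hc : c = ','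
      · subst hc
        have hp : [','].isPrefixOf (',' :: rest) = true := by simp [List.isPrefixOf]
        simp only [hp, if_true, List.length_singleton]
        rw [ih _ _ _ (by simpa using Nat.lt_of_succ_lt_succ h)]
        simp only [List.drop_one, List.tail_cons] at *
        obtain ⟨t, ts, hts⟩ : ∃ t ts, pvSegs rest = t :: ts := by
          rcases hs : pvSegs rest with _ | ⟨t, ts⟩
          · exact absurd hs (pvSegs_ne_nil rest)
          · exact ⟨t, ts, rfl⟩
        simp [pvSegs, hts, pvConsHead]
      · have hp : [','].isPrefixOf (c :: rest) = false := by
          simp [List.isPrefixOf, BEq.beq]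
          intro hcc; exact hc hcc.symm
        simp only [hp, Bool.false_eq_true, if_false]
        rw [ih _ _ _ (by simpa using Nat.lt_of_succ_lt_succ h)]
        obtain ⟨t, ts, hts⟩ : ∃ t ts, pvSegs rest = t :: ts := by
          rcases hs : pvSegs rest with _ | ⟨t, ts⟩
          · exact absurd hs (pvSegs_ne_nil rest)
          · exact ⟨t, ts, rfl⟩
        simp [pvSegs, hts, pvConsHead, hc]

theorem pvConsHead_nil (L : List (List Char)) (h : L ≠ []) : pvConsHead [] L = L := by
  cases L with
  | nil => exact absurd rfl h
  | cons t ts => simp [pvConsHead]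

theorem splitOn_comma_eq (s : List Char) : PySem.Chars.splitOn s [','] = pvSegs s := by
  unfold PySem.Chars.splitOn
  rw [splitOn_go_eq _ _ _ _ (Nat.lt_succ_self _)]
  simp [pvConsHead_nil _ (pvSegs_ne_nil s)]

theorem split₀_go_acc (l cur : List Char) (acc : List (List Char)) :
    PySem.Chars.split₀.go l cur acc = acc.reverse ++ PySem.Chars.split₀.go l cur [] := by
  induction l generalizing cur acc with
  | nil =>
    rw [PySem.Chars.split₀.go, PySem.Chars.split₀.go]
    by_cases hc : cur.isEmpty <;> simp [hc]
  | cons c rest ih =>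
    rw [PySem.Chars.split₀.go]
    conv_rhs => rw [PySem.Chars.split₀.go]
    by_cases hs : PySem.Chars.isspace c
    · by_cases hc : cur.isEmpty <;> simp only [hs, hc, if_true, if_false, Bool.false_eq_true]
      · rw [ih [] acc]
      · rw [ih [] (cur.reverse :: acc), ih [] [cur.reverse]]
        simp
    · simp only [hs, Bool.false_eq_true, if_false]
      rw [ih (c :: cur) acc]

theorem split₀_go_head (l : List Char) : ∀ (cur : List Char), cur ≠ [] →
    ∃ ts, PySem.Chars.split₀.go l cur [] =
      (cur.reverse ++ l.takeWhile (fun d => !PySem.Chars.isspace d)) :: ts := by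
  induction l with
  | nil =>
    intro cur h
    rw [PySem.Chars.split₀.go]
    simp [List.isEmpty_iff, h]
  | cons c rest ih =>
    intro cur h
    rw [PySem.Chars.split₀.go]
    by_cases hs : PySem.Chars.isspace c
    · simp only [hs, if_true, List.isEmpty_iff, h, if_false]
      rw [split₀_go_acc]
      refine ⟨PySem.Chars.split₀.go rest [] [], ?_⟩
      simp [hs]
    · simp only [hs, Bool.false_eq_true, if_false]
      obtain ⟨ts, hts⟩ := ih (c :: cur) (by simp)
      refine ⟨ts, ?_⟩
      rw [hts]
      simp [hs]

theorem split₀_go_lstrip (l : List Char) :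
    PySem.Chars.split₀.go l [] [] = PySem.Chars.split₀.go (PySem.Chars.lstrip l) [] [] := by
  induction l with
  | nil => rfl
  | cons c rest ih =>
    by_cases hs : PySem.Chars.isspace c
    · rw [PySem.Chars.split₀.go]
      simp only [hs, if_true, List.isEmpty_nil, if_true]
      rw [ih]
      simp [PySem.Chars.lstrip, hs]
    · simp [PySem.Chars.lstrip, hs]

theorem split₀_head (seg : List Char) : (PySem.Chars.split₀ seg).head? = pvTok? seg := by
  unfold PySem.Chars.split₀ pvTok?
  rw [split₀_go_lstrip]
  rcases hl : PySem.Chars.lstrip seg with _ | ⟨d, r⟩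
  · rw [PySem.Chars.split₀.go]; simp
  · have hd : PySem.Chars.isspace d = false := by
      have h1 : seg.dropWhile PySem.Chars.isspace = d :: r := by simpa [PySem.Chars.lstrip] using hl
      have h2 := List.head_dropWhile_not PySem.Chars.isspace (l := seg) (by simp [h1])
      simpa [h1] using h2
    rw [PySem.Chars.split₀.go]
    simp only [hd, Bool.false_eq_true, if_false]
    obtain ⟨ts, hts⟩ := split₀_go_head r [d] (by simp)
    rw [hts]
    simp [hd]

theorem strip_id (w : List Char) (h : ∀ c ∈ w, PySem.Chars.isspace c = false) :
    PySem.Chars.strip w = w := by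
  unfold PySem.Chars.strip PySem.Chars.rstrip PySem.Chars.lstrip
  rw [dropWhile_eq_self_of_false h, dropWhile_eq_self_of_false (by simpa using h)]
  simp

theorem foldl_bridge (L : List (List Char)) (init : List String) :
    (L.map String.ofList).foldl (fun acc w =>
        let words_after_comma := PySem.Str.split₀ w
        if words_after_comma.length > 0 then
          acc ++ [PySem.Str.strip (PySem.List.pyGetD words_after_comma 0 "")]
        else acc) init
      = init ++ (L.filterMap pvTok?).map String.ofList := by
  induction L generalizing init with
  | nil => simp
  | cons seg L ih =>
    simp only [List.map_cons, List.foldl_cons]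
    have hsp : PySem.Str.split₀ (String.ofList seg) = (PySem.Chars.split₀ seg).map String.ofList := by
      simp [PySem.Str.split₀, String.toList_ofList]
    rcases htk : pvTok? seg with _ | w
    · have hnil : PySem.Chars.split₀ seg = [] := by
        have h := split₀_head seg; rw [htk] at h; exact List.head?_eq_none_iff.mp h
      rw [ih]
      simp [hsp, hnil, htk]
    · have hh := split₀_head seg; rw [htk] at hh
      obtain ⟨ts, hts⟩ : ∃ ts, PySem.Chars.split₀ seg = w :: ts := by
        rcases hsz : PySem.Chars.split₀ seg with _ | ⟨x, ts⟩
        · rw [hsz] at hh; simp at hh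
        · rw [hsz] at hh; simp at hh; exact ⟨ts, by rw [hh]⟩
      have hw_props : w ≠ [] ∧ ∀ c ∈ w, PySem.Chars.isspace c = false := by
        unfold pvTok? at htk
        by_cases hz : (PySem.Chars.lstrip seg).takeWhile (fun d => !PySem.Chars.isspace d) = []
        · simp [hz] at htk
        · simp only [hz, if_false, Option.some_inj] at htk
          constructor
          · rw [← htk]; exact hz
          · intro c hc
            rw [← htk] at hc
            have := List.mem_takeWhile_imp hc
            simpa using this
      have hstrip : PySem.Str.strip (String.ofList w) = String.ofList w := by
        unfold PySem.Str.strip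
        rw [String.toList_ofList, strip_id w hw_props.2]
      rw [ih]
      simp [hsp, hts, htk, PySem.List.pyGetD, hstrip]

theorem sort_words_after_comma_eq (string : String) :
    sort_words_after_comma string =
      PySem.List.sorted (((pvSegs string.toList).tail.filterMap pvTok?).map String.ofList)
        (fun x => x) false := by
  unfold sort_words_after_comma
  dsimp only []
  rw [show (",".toList) = [','] from rfl, splitOn_comma_eq]
  rw [PySem.List.foldl_pyRange_pyGetD' (List.map String.ofList (pvSegs string.toList)) ""
        (fun acc w =>
          let words_after_comma := PySem.Str.split₀ w
          if words_after_comma.length > 0 then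
            acc ++ [PySem.Str.strip (PySem.List.pyGetD words_after_comma 0 "")]
          else acc) [] (by norm_num)]
  rw [show (Int.toNat 1) = 1 from rfl, List.drop_one, ← List.map_tail]
  rw [foldl_bridge]
  simp


-- ===== VERDICT (by name: the statement is the Claim_ definition above) =====
theorem sort_words_after_comma_spec : Claim_equal_sort_words_after_comma := by
  intro string _
  unfold Spec_sort_words_after_comma sort_words_after_comma_alt
  rw [sort_words_after_comma_eq, pvScan_eq]
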